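-- pv_equiv track=rewrite | github.com/reagankan/gym | plot_utils.py | get_personal_record
-- ===== SOURCE A (Python) =====
-- def get_personal_record(weights):
--     if not weights:
--         return None, None  # row_idx, max_value
--
--     max_value = None
--     max_row_idx = None
--
--     for i, row in enumerate(weights):
--         if not row:
--             continue
--         row_max = max(row)
--         if (max_value is None) or (row_max > max_value):
--             max_value = row_max
--             max_row_idx = i
--
--     return max_row_idx, max_value
-- ===== SOURCE B (Python) =====
-- def get_personal_record(weights):
--     # Two staged passes: find the global maximum of all the data flattened,
--     # then locate the first row that CONTAINS that value (membership test,
--     # no per-row maxima or running-max comparisons at all).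
--     flat = [x for row in weights for x in row]
--     if not flat:
--         return None, None
--     m = max(flat)
--     for i, row in enumerate(weights):
--         if m in row:
--             return i, m
--     return None, None  # unreachable: m came from some row
-- ===== Notes on version B (the rewrite author's own statement) =====
-- stated objective: alternative
-- what changed: Replaces the fused running-max-per-row fold by a two-stage algorithm: flatten all rows and take one global max, then return the index of the first row that contains that value via a membership scan (no per-row maxima or running-max state).
import Mathlib
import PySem

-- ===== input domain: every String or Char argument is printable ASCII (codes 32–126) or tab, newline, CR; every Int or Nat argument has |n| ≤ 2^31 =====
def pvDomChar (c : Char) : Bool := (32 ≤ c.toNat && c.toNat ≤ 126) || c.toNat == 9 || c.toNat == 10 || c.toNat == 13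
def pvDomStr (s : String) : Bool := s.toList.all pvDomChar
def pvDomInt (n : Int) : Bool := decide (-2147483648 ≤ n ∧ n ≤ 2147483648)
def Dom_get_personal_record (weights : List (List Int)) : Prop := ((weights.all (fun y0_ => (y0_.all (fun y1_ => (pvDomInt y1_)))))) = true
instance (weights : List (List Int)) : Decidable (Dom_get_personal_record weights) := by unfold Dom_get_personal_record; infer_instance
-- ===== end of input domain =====

-- B replaces A's fused running-max loop by two staged passes: a global max over the flattened data, then a membership scan for the first row containing it (alternative decomposition, same cost).


-- ===== PORT A =====
def get_personal_record (weights : List (List Int)) : Option Int × Option Int :=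
  if weights = [] then (none, none)
  else
    -- state (max_value, max_row_idx); loop over enumerate(weights)
    let r := (PySem.List.enumerate weights).foldl
      (fun (acc : Option Int × Option Int) (p : Int × List Int) =>
        match p.2 with
        | [] => acc
        | h :: t =>
          let row_max : Int := t.foldl max h   -- max(row); exact, cf. PySem.List.le_foldl_max
          match acc.1 with
          | none => (some row_max, some p.1)
          | some mv => if row_max > mv then (some row_max, some p.1) else acc)
      (none, none)
    (r.2, r.1)

-- ===== PORT B =====
def get_personal_record_alt (weights : List (List Int)) : Option Int × Option Int :=
  let flat : List Int := weights.flatMap (fun row => row)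
  match flat with
  | [] => (none, none)
  | h :: t =>
    let m : Int := t.foldl max h   -- max(flat); exact, cf. PySem.List.le_foldl_max
    match (PySem.List.enumerate weights).find? (fun p => p.2.contains m) with
    | some p => (some p.1, some m)
    | none => (none, none)   -- unreachable: m came from some row

-- ===== PRECONDITION & SPEC =====
def Spec_get_personal_record (weights : List (List Int)) (out : Option Int × Option Int) : Prop := out = get_personal_record_alt weights
instance (weights : List (List Int)) (out : Option Int × Option Int) : Decidable (Spec_get_personal_record weights out) := by unfold Spec_get_personal_record; infer_instance

-- ===== CLAIM (what is proved, stated in full; the proofs are below) =====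
def Claim_equal_get_personal_record : Prop := ∀ (weights : List (List Int)), Dom_get_personal_record weights → Spec_get_personal_record weights (get_personal_record weights)

-- ===== LEMMAS AND PROOFS =====

-- view of A's two-Option state as one optional (value, index) pair
def pvPair (o : Option (Int × Int)) : Option Int × Option Int :=
  match o with
  | none => (none, none)
  | some m => (some m.1, some m.2)

-- A's update step on the (value, index) view
def pvMStep (o : Option (Int × Int)) (c : Int × Int) : Option (Int × Int) :=
  match o with
  | none => some c
  | some m => if m.1 < c.1 then some c else some m

-- the (row_max, index) candidates of the nonempty rows
def pvCands (ws : List (List Int)) (i : Int) : List (Int × Int) :=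
  (PySem.List.enumerate ws i).filterMap
    (fun p => match p.2 with
      | [] => none
      | h :: t => some ((t.foldl max h : Int), p.1))

lemma foldA_eq (ws : List (List Int)) (i : Int) (o : Option (Int × Int)) :
    (PySem.List.enumerate ws i).foldl
      (fun (acc : Option Int × Option Int) (p : Int × List Int) =>
        match p.2 with
        | [] => acc
        | h :: t =>
          let row_max : Int := t.foldl max h
          match acc.1 with
          | none => (some row_max, some p.1)
          | some mv => if row_max > mv then (some row_max, some p.1) else acc)
      (pvPair o)
    = pvPair ((pvCands ws i).foldl pvMStep o) := by
  induction ws generalizing i o with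
  | nil => simp [PySem.List.enumerate, pvCands]
  | cons w ws ih =>
    unfold pvCands
    rw [PySem.List.enumerate_cons]
    cases w with
    | nil => simpa [pvCands] using ih (i + 1) o
    | cons h t =>
      simp only [List.foldl_cons, List.filterMap_cons]
      have := ih (i + 1) (pvMStep o ((t.foldl max h : Int), i))
      unfold pvCands at this
      rw [← this]
      congr 1
      cases o with
      | none => rfl
      | some m =>
        simp only [pvPair, pvMStep, gt_iff_lt]
        split_ifs <;> rfl

-- once the accumulator dominates all remaining candidates it never changes
lemma foldl_keep (l : List (Int × Int)) (a : Int × Int) (hle : ∀ c ∈ l, c.1 ≤ a.1) :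
    l.foldl pvMStep (some a) = some a := by
  induction l with
  | nil => rfl
  | cons c l ih =>
    have hc : c.1 ≤ a.1 := hle c (by simp)
    simp only [List.foldl_cons, pvMStep, if_neg (not_lt.mpr hc)]
    exact ih (fun d hd => hle d (by simp [hd]))

-- the running strict-record fold returns the FIRST candidate attaining the max m
lemma foldl_first_max (m : Int) (l : List (Int × Int)) :
    ∀ (acc : Option (Int × Int)) (c₀ : Int × Int),
    (∀ c ∈ l, c.1 ≤ m) → (∀ b, acc = some b → b.1 < m) →
    l.find? (fun c => c.1 == m) = some c₀ →
    l.foldl pvMStep acc = some c₀ := by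
  induction l with
  | nil => intro acc c₀ _ _ h; simp at h
  | cons c l ih =>
    intro acc c₀ hle hacc hfind
    by_cases hc : c.1 = m
    · rw [List.find?_cons_of_pos (by simp [hc])] at hfind
      cases hfind
      have hstep : pvMStep acc c = some c := by
        cases acc with
        | none => rfl
        | some b => simp [pvMStep, if_pos (hc ▸ hacc b rfl)]
      rw [List.foldl_cons, hstep]
      exact foldl_keep l c (fun d hd => hc ▸ hle d (by simp [hd]))
    · rw [List.find?_cons_of_neg (by simp [hc])] at hfind
      have hclt : c.1 < m := lt_of_le_of_ne (hle c (by simp)) hc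
      rw [List.foldl_cons]
      refine ih (pvMStep acc c) c₀ (fun d hd => hle d (by simp [hd])) ?_ hfind
      intro b hb
      cases acc with
      | none => simp only [pvMStep] at hb; cases hb; exact hclt
      | some a =>
        have ha := hacc a rfl
        simp only [pvMStep] at hb
        split_ifs at hb <;> (cases hb; assumption)

-- every candidate value is a value occurring in the flattened data
lemma cands_fst_mem_flat (ws : List (List Int)) :
    ∀ (i : Int) (c : Int × Int), c ∈ pvCands ws i → c.1 ∈ ws.flatMap (fun r => r) := by
  induction ws with
  | nil => intro i c hc; simp [pvCands, PySem.List.enumerate] at hc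
  | cons w ws ih =>
    intro i c hc
    unfold pvCands at hc
    rw [PySem.List.enumerate_cons, List.filterMap_cons] at hc
    cases w with
    | nil => simpa using ih (i + 1) c hc
    | cons h t =>
      simp only [List.mem_cons] at hc
      rw [List.flatMap_cons, List.mem_append]
      rcases hc with rfl | hc
      · have : t.foldl max h = h ∨ t.foldl max h ∈ t := PySem.List.foldl_max_mem t h
        rw [List.mem_cons]
        rcases this with e | e
        · exact Or.inl (Or.inl e)
        · exact Or.inl (Or.inr e)
      · exact Or.inr (ih (i + 1) c hc)

-- no data at all means no candidates
lemma cands_nil_of_flat_nil (ws : List (List Int)) :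
    ∀ i : Int, ws.flatMap (fun r => r) = [] → pvCands ws i = [] := by
  induction ws with
  | nil => intro i _; simp [pvCands, PySem.List.enumerate]
  | cons w ws ih =>
    intro i hflat
    rw [List.flatMap_cons, List.append_eq_nil_iff] at hflat
    unfold pvCands
    rw [PySem.List.enumerate_cons, List.filterMap_cons, hflat.1]
    simpa [pvCands] using ih (i + 1) hflat.2

-- the two searches agree: first row containing m  ↔  first candidate with row-max m
lemma link (m : Int) (ws : List (List Int)) :
    ∀ i : Int,
    (∀ x ∈ ws.flatMap (fun r => r), x ≤ m) → m ∈ ws.flatMap (fun r => r) →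
    ∃ i₀ row, (PySem.List.enumerate ws i).find? (fun p => p.2.contains m) = some (i₀, row)
      ∧ (pvCands ws i).find? (fun c => c.1 == m) = some (m, i₀) := by
  induction ws with
  | nil => intro i _ hm; simp at hm
  | cons w ws ih =>
    intro i hle hm
    rw [PySem.List.enumerate_cons]
    by_cases hw : m ∈ w
    · obtain ⟨h, t, rfl⟩ : ∃ h t, w = h :: t := by
        cases w with
        | nil => simp at hw
        | cons h t => exact ⟨h, t, rfl⟩
      have hmax : t.foldl max h = m := by
        have hub : t.foldl max h ≤ m := by
          have : t.foldl max h = h ∨ t.foldl max h ∈ t := PySem.List.foldl_max_mem t h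
          refine hle _ ?_
          rcases this with e | e <;> simp [List.flatMap_cons, e]
        have hlb : m ≤ t.foldl max h := by
          have hp := PySem.List.le_foldl_max t h
          rcases List.mem_cons.mp hw with rfl | hmt
          · exact hp.1
          · exact hp.2 m hmt
        omega
      refine ⟨i, h :: t, ?_, ?_⟩
      · rw [List.find?_cons_of_pos (by simpa using hw)]
      · unfold pvCands
        rw [PySem.List.enumerate_cons, List.filterMap_cons]
        simp only [hmax]
        rw [List.find?_cons_of_pos (by simp)]
    · have hm' : m ∈ ws.flatMap (fun r => r) := by
        rw [List.flatMap_cons, List.mem_append] at hm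
        exact hm.resolve_left hw
      have hle' : ∀ x ∈ ws.flatMap (fun r => r), x ≤ m := by
        intro x hx
        exact hle x (by rw [List.flatMap_cons, List.mem_append]; exact Or.inr hx)
      obtain ⟨i₀, row, hf, hc⟩ := ih (i + 1) hle' hm'
      refine ⟨i₀, row, ?_, ?_⟩
      · rw [List.find?_cons_of_neg (by simpa using hw)]
        exact hf
      · unfold pvCands
        rw [PySem.List.enumerate_cons, List.filterMap_cons]
        cases w with
        | nil => exact hc
        | cons h t =>
          have hne : t.foldl max h ≠ m := by
            intro e
            apply hw
            have : t.foldl max h = h ∨ t.foldl max h ∈ t := PySem.List.foldl_max_mem t h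
            rcases this with e' | e' <;> simp [← e, e']
          simp only []
          rw [List.find?_cons_of_neg (by simpa using hne)]
          exact hc

-- ===== VERDICT (by name: the statement is the Claim_ definition above) =====
theorem get_personal_record_spec : Claim_equal_get_personal_record := by
  intro weights _
  unfold Spec_get_personal_record
  simp only [get_personal_record, get_personal_record_alt]
  have hA := foldA_eq weights 0 none
  simp only [pvPair] at hA
  cases hflat : weights.flatMap (fun r => r) with
  | nil =>
    have hcands := cands_nil_of_flat_nil weights 0 hflat
    by_cases hw : weights = []
    · simp [hw]
    · rw [if_neg hw]
      simp only []
      rw [hA, hcands]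
      rfl
  | cons h t =>
    have hw : weights ≠ [] := by
      intro e; rw [e] at hflat; simp at hflat
    rw [if_neg hw]
    set m : Int := t.foldl max h with hm
    have hp := PySem.List.le_foldl_max t h
    have hle : ∀ x ∈ weights.flatMap (fun r => r), x ≤ m := by
      rw [hflat]; intro x hx
      rcases List.mem_cons.mp hx with rfl | hxt
      · exact hp.1
      · exact hp.2 x hxt
    have hmem : m ∈ weights.flatMap (fun r => r) := by
      rw [hflat, List.mem_cons]
      rcases PySem.List.foldl_max_mem t h with e | e
      · exact Or.inl (by rw [hm, e])
      · exact Or.inr (by rw [hm]; exact e)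
    obtain ⟨i₀, row, hf, hc⟩ := link m weights 0 hle hmem
    have hfold : (pvCands weights 0).foldl pvMStep none = some (m, i₀) := by
      refine foldl_first_max m (pvCands weights 0) none (m, i₀)
        (fun c hcm => hle c.1 (cands_fst_mem_flat weights 0 c hcm)) ?_ hc
      intro b hb; cases hb
    simp only []
    rw [hA, hfold, hf]
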